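-- pv_equiv track=rewrite | github.com/daniel-reich/ubiquitous-fiesta | auLEvdvBT5PRnALvn_4.py | mirror_cipher
-- ===== SOURCE A (Python) =====
-- def mirror_cipher(message, key="abcdefghijklmnopqrstuvwxyz"):
--     key = key.lower()
--     n = len(key)
--     encoded = ""
--     for c in message.lower():
--         if c in key:
--             encoded += key[n - 1 - key.index(c)]
--         else:
--             encoded += c
--     return encoded
-- ===== SOURCE B (Python) =====
-- def mirror_cipher(message, key="abcdefghijklmnopqrstuvwxyz"):
--     # Inverted traversal: sweep the KEY once (outer), rewriting every still-pending
--     # message position that holds the current key char; positions are frozen after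
--     # one rewrite, so a later duplicate key char never touches them (first occurrence wins).
--     key = key.lower()
--     n = len(key)
--     out = list(message.lower())
--     pending = [True] * len(out)
--     for i in range(n):
--         c = key[i]
--         r = key[n - 1 - i]
--         for j in range(len(out)):
--             if pending[j] and out[j] == c:
--                 out[j] = r
--                 pending[j] = False
--     return "".join(out)
-- ===== Notes on version B (the rewrite author's own statement) =====
-- stated objective: alternative
-- what changed: B inverts the traversal: instead of scanning the key for each message character, it sweeps the key once (outer loop) and rewrites every still-pending message position holding the current key character, freezing each position after its first rewrite so duplicate key characters keep first-occurrence semantics.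
import Mathlib
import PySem

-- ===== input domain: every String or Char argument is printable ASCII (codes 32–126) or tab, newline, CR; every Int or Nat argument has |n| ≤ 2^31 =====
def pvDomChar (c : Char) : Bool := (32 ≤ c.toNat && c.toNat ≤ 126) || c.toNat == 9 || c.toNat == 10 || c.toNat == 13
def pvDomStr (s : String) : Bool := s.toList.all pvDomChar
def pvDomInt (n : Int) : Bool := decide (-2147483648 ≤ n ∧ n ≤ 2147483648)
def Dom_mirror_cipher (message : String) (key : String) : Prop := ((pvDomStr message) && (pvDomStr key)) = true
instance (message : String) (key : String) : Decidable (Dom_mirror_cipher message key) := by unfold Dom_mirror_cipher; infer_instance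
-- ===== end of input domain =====

-- B inverts the traversal: instead of scanning the key per message character, it sweeps the
-- key once and rewrites all still-pending message positions holding that key character
-- (alternative decomposition; same worst-case cost).

-- ===== PORT A =====
-- literal port of A: per message char, scan the key with `in`/`index`
def mirror_cipher (message : String) (key : String) : String :=
  let kl := (PySem.Str.lower key).toList
  let n : Int := kl.length
  let encoded := (PySem.Str.lower message).toList.foldl (fun acc c =>
    if c ∈ kl then
      -- key[n-1-key.index(c)]: index exists (c ∈ kl) and n-1-i is in range, so getD's defaults never fire
      acc ++ [(PySem.List.pyGet? kl (n - 1 - ((PySem.List.index? kl c).getD 0 : Int))).getD c]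
    else
      acc ++ [c]) []
  String.ofList encoded

-- ===== PORT B =====
-- literal port of B: the lockstep lists `out`/`pending` are carried as one list of pairs
-- (out char, pending flag); the inner `for j` loop, which updates each position
-- independently, is the elementwise map over that state list.
def mirror_cipher_alt (message : String) (key : String) : String :=
  let kl := (PySem.Str.lower key).toList
  let n : Int := kl.length
  let st0 := (PySem.Str.lower message).toList.map (fun c => (c, true))
  let st := (PySem.List.pyRange 0 n 1).foldl (fun st i =>
      let c := (PySem.List.pyGet? kl i).getD ' '
      let r := (PySem.List.pyGet? kl (n - 1 - i)).getD ' '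
      st.map (fun t => if t.2 && (t.1 == c) then (r, false) else t)) st0
  String.ofList (st.map (fun t => t.1))

-- ===== PRECONDITION & SPEC =====
def Spec_mirror_cipher (message : String) (key : String) (out : String) : Prop := out = mirror_cipher_alt message key
instance (message : String) (key : String) (out : String) : Decidable (Spec_mirror_cipher message key out) := by unfold Spec_mirror_cipher; infer_instance

-- ===== CLAIM (what is proved, stated in full; the proofs are below) =====
def Claim_equal_mirror_cipher : Prop := ∀ (message : String) (key : String), Dom_mirror_cipher message key → Spec_mirror_cipher message key (mirror_cipher message key)

-- ===== LEMMAS AND PROOFS =====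

-- the mirrored character for index i (shared subterm of both ports)
def pvG (kl : List Char) (i : Int) (c : Char) : Char :=
  (PySem.List.pyGet? kl ((kl.length : Int) - 1 - i)).getD c

-- the per-character translation A computes
def pvAchar (kl : List Char) (c : Char) : Char :=
  if c ∈ kl then pvG kl ((PySem.List.index? kl c).getD 0 : Int) c else c

-- pyGet? on an in-range index (used by the loop proof)
lemma pv_get_some (kl : List Char) (i : Int) (h0 : 0 ≤ i) (h1 : i < (kl.length : Int)) :
    PySem.List.pyGet? kl i = some kl[i.toNat] := by
  have : i = ((i.toNat : Nat) : Int) := by omega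
  conv_lhs => rw [this]
  rw [PySem.List.pyGet?_natCast]
  exact List.getElem?_eq_getElem (by omega)

-- B's per-position step for key index i
def pvStepB (kl : List Char) (i : Int) (t : Char × Bool) : Char × Bool :=
  if t.2 && (t.1 == (PySem.List.pyGet? kl i).getD ' ') then
    ((PySem.List.pyGet? kl ((kl.length : Int) - 1 - i)).getD ' ', false)
  else t

lemma pv_foldl_map_elemwise {α β : Type} (g : α → β → β) :
    ∀ (L : List α) (st : List β),
      L.foldl (fun st i => st.map (g i)) st = st.map (fun t => L.foldl (fun t i => g i t) t) := by
  intro L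
  induction L with
  | nil => intro st; simp
  | cons i L ih =>
      intro st
      simp [List.foldl_cons, ih, List.map_map]

-- once pending is false the position is frozen
lemma pv_frozen (kl : List Char) (u : Char) :
    ∀ L : List Int, L.foldl (fun t i => pvStepB kl i t) (u, false) = (u, false) := by
  intro L
  induction L with
  | nil => rfl
  | cons i L ih =>
      rw [List.foldl_cons]
      have h : pvStepB kl i (u, false) = (u, false) := by simp [pvStepB]
      rw [h, ih]

lemma pv_loop_spec (kl : List Char) (c0 : Char) :
    ∀ (m : Nat) (a : Int), 0 ≤ a → ((kl.length : Int) - a).toNat = m →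
      (PySem.List.pyRange a (kl.length : Int) 1).foldl (fun t i => pvStepB kl i t) (c0, true)
        = match PySem.List.index? (kl.drop a.toNat) c0 with
          | some j => (pvG kl (a + (j : Int)) c0, false)
          | none => (c0, true) := by
  intro m
  induction m with
  | zero =>
      intro a ha hm
      have hge : (kl.length : Int) ≤ a := by omega
      have hdrop : kl.drop a.toNat = [] := by
        apply List.drop_eq_nil_of_le; omega
      rw [PySem.List.pyRange_one_eq_nil hge, hdrop]
      simp [PySem.List.index?]
  | succ m ih =>
      intro a ha hm
      have hlt : a < (kl.length : Int) := by omega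
      rw [PySem.List.pyRange_one_cons hlt]
      have hidx : a.toNat < kl.length := by omega
      have hget : PySem.List.pyGet? kl a = some kl[a.toNat] :=
        pv_get_some kl a ha hlt
      have hnat : (a + 1).toNat = a.toNat + 1 := by omega
      have hdrop : kl.drop a.toNat = kl[a.toNat] :: kl.drop (a + 1).toNat := by
        rw [hnat]
        exact List.drop_eq_getElem_cons hidx
      simp only [List.foldl_cons]
      by_cases hc : c0 = kl[a.toNat]
      · have hmir : PySem.List.pyGet? kl ((kl.length : Int) - 1 - a)
            = some kl[((kl.length : Int) - 1 - a).toNat] :=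
          pv_get_some kl _ (by omega) (by omega)
        have hstep : pvStepB kl a (c0, true) = (pvG kl a c0, false) := by
          simp [pvStepB, hget, hc, pvG, hmir]
        rw [hstep, pv_frozen]
        rw [hdrop, ← hc, PySem.List.index?_cons_self]
        simp
      · have hstep : pvStepB kl a (c0, true) = (c0, true) := by
          simp [pvStepB, hget, hc]
        rw [hstep, ih (a + 1) (by omega) (by omega)]
        rw [hdrop, PySem.List.index?_cons_of_ne _ (fun h => hc h.symm)]
        cases h : PySem.List.index? (kl.drop (a + 1).toNat) c0 with
        | none => simp
        | some j =>
            simp only [Option.map_some]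
            have : a + 1 + (j : Int) = a + ((j + 1 : Nat) : Int) := by push_cast; ring
            simp [this]

-- B's per-position result equals A's per-character translation
lemma pv_char_eq (kl : List Char) (c0 : Char) :
    ((PySem.List.pyRange 0 (kl.length : Int) 1).foldl
        (fun t i => pvStepB kl i t) (c0, true)).1 = pvAchar kl c0 := by
  rw [pv_loop_spec kl c0 ((kl.length : Int) - 0).toNat 0 le_rfl rfl]
  simp only [Int.toNat_zero, List.drop_zero]
  cases h : PySem.List.index? kl c0 with
  | none =>
      have hnm : c0 ∉ kl := (PySem.List.index?_eq_none_iff _ _).mp h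
      simp [pvAchar, hnm]
  | some j =>
      have hmem : c0 ∈ kl := (PySem.List.index?_isSome_iff kl c0).mp (by rw [h]; rfl)
      have h' : List.idxOf? c0 kl = some j := by
        rw [← PySem.List.index?_eq_idxOf?]; exact h
      simp [pvAchar, hmem, h']

lemma pv_foldl_append (f : Char → Char) :
    ∀ (xs : List Char) (acc : List Char),
      xs.foldl (fun acc c => acc ++ [f c]) acc = acc ++ xs.map f := by
  intro xs
  induction xs with
  | nil => simp
  | cons x xs ih => intro acc; simp [List.foldl_cons, ih]

-- ===== VERDICT (by name: the statement is the Claim_ definition above) =====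
set_option maxHeartbeats 1000000 in
theorem mirror_cipher_spec : Claim_equal_mirror_cipher := by
  intro message key _
  unfold Spec_mirror_cipher mirror_cipher mirror_cipher_alt
  set kl := (PySem.Str.lower key).toList with hkl
  set ml := (PySem.Str.lower message).toList with hml
  -- A side: a map of pvAchar over the message
  have hbody : (fun (acc : List Char) (c : Char) =>
      if c ∈ kl then
        acc ++ [(PySem.List.pyGet? kl ((kl.length : Int) - 1 - ((PySem.List.index? kl c).getD 0 : Int))).getD c]
      else acc ++ [c]) = (fun acc c => acc ++ [pvAchar kl c]) := by
    funext acc c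
    by_cases h : c ∈ kl <;> simp [pvAchar, pvG, h]
  simp only [hbody, pv_foldl_append, List.nil_append]
  -- B side: elementwise fold, then pv_char_eq per element
  have hstepB : (fun (st : List (Char × Bool)) (i : Int) =>
      st.map (fun t => if t.2 && (t.1 == (PySem.List.pyGet? kl i).getD ' ') then
        ((PySem.List.pyGet? kl ((kl.length : Int) - 1 - i)).getD ' ', false) else t))
      = (fun st i => st.map (fun t => pvStepB kl i t)) := by
    funext st i
    simp [pvStepB]
  simp only [hstepB, pv_foldl_map_elemwise, List.map_map]
  congr 1
  apply List.map_congr_left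
  intro c _
  exact (pv_char_eq kl c).symm
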